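-- pv_equiv track=rewrite | github.com/pypi-data/pypi-mirror-181 | packages/project-ml-AB3NzaC1yc-hatch/project_ml_ab3nzac1yc_hatch-1.0.1.tar.gz/project_ml_ab3nzac1yc_hatch-1.0.1/dadinet/generate_data.py | _get_subsequent_layer
-- ===== SOURCE A (Python) =====
-- def _get_subsequent_layer(init_hls: list, n_sub_layer: int):
--     """
--     Helper method for calculating subsequent layer size
--     base on the initial hls list and number of subsequent layers wanted
--     Return: full list of different hidden_layer_size options
--     """
--     # stop recursion condition
--     if n_sub_layer == 0:
--         return init_hls
--
--     # get the last layer size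
--     init_layer_size = init_hls[-1][-1]
--     # reduce init layer size to get next layer size
--     next_layer_size = int(init_layer_size / 2)
--     # make new tuple with new layer size and append to init_hls
--     new_hls = list(init_hls[-1])
--     new_hls.append(next_layer_size)
--     init_hls.append(tuple(new_hls))
--
--     return _get_subsequent_layer(init_hls, n_sub_layer - 1)
-- ===== SOURCE B (Python) =====
-- def _get_subsequent_layer(init_hls: list, n_sub_layer: int):
--     """Iterative version: extend init_hls in place, one new tuple per step."""
--     for _ in range(n_sub_layer):
--         last = init_hls[-1]
--         init_hls.append(tuple(last) + (int(last[-1] / 2),))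
--     return init_hls
-- ===== Notes on version B (the rewrite author's own statement) =====
-- stated objective: simpler
-- what changed: Replaces tail recursion with an iterative for-loop over range(n_sub_layer) that appends tuple(last)+(int(last[-1]/2),) each step; Pre_ excludes exactly the inputs where A does not return (negative n_sub_layer: unbounded recursion; positive n with empty init_hls or empty last layer: IndexError).
import Mathlib
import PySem

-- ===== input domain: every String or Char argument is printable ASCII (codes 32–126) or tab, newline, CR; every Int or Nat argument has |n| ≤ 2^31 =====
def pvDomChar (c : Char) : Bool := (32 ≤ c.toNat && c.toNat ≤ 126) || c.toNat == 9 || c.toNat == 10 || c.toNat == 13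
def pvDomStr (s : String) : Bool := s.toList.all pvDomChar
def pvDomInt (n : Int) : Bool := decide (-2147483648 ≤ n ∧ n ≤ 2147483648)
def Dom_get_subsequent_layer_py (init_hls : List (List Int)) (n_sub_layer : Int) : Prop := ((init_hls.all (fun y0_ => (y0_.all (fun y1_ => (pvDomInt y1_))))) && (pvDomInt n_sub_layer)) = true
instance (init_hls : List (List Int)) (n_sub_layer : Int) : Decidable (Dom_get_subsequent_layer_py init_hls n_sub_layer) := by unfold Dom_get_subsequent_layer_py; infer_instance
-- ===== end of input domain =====

-- B replaces A's tail recursion with an iterative loop over range(n_sub_layer) (objective: simpler).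
-- Both programs mutate init_hls in place in Python; the equivalence proved here is about the return value.
-- ===== PORT A =====
-- A recurses with n_sub_layer - 1; for n_sub_layer < 0 the Python recursion never ends
-- (RecursionError), excluded by Pre_: the port returns [] there. IndexError branches
-- (pyGet? = none) are likewise excluded by Pre_.
def get_subsequent_layer_py (init_hls : List (List Int)) (n_sub_layer : Int) : List (List Int) :=
  if n_sub_layer = 0 then init_hls
  else if n_sub_layer < 0 then []  -- Python: infinite recursion (RecursionError); outside Pre_
  else
    match PySem.List.pyGet? init_hls (-1) with
    | none => []  -- IndexError; outside Pre_
    | some last =>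
      match PySem.List.pyGet? last (-1) with
      | none => []  -- IndexError; outside Pre_
      | some init_layer_size =>
        let next_layer_size := PySem.Int.truncdiv init_layer_size 2  -- int(x / 2)
        let new_hls := last ++ [next_layer_size]
        get_subsequent_layer_py (init_hls ++ [new_hls]) (n_sub_layer - 1)
termination_by n_sub_layer.toNat
decreasing_by omega

-- ===== PORT B =====
-- one loop iteration of B's for-body
def pvStepB (acc : List (List Int)) : List (List Int) :=
  match PySem.List.pyGet? acc (-1) with
  | none => []  -- IndexError; outside Pre_
  | some last =>
    match PySem.List.pyGet? last (-1) with
    | none => []  -- IndexError; outside Pre_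
    | some sz => acc ++ [last ++ [PySem.Int.truncdiv sz 2]]

def get_subsequent_layer_py_alt (init_hls : List (List Int)) (n_sub_layer : Int) : List (List Int) :=
  (List.range n_sub_layer.toNat).foldl (fun acc _ => pvStepB acc) init_hls

-- ===== PRECONDITION & SPEC =====
-- Pre_ excludes exactly the inputs where A does not return normally: negative n_sub_layer
-- (unbounded recursion) and n_sub_layer > 0 with init_hls empty or its last layer empty (IndexError).
def Pre_get_subsequent_layer_py (init_hls : List (List Int)) (n_sub_layer : Int) : Prop :=
  0 ≤ n_sub_layer ∧ (n_sub_layer = 0 ∨ init_hls.getLast?.getD [] ≠ [])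
instance (init_hls : List (List Int)) (n_sub_layer : Int) : Decidable (Pre_get_subsequent_layer_py init_hls n_sub_layer) := by unfold Pre_get_subsequent_layer_py; infer_instance
def pvWitness_get_subsequent_layer_py : List (List Int) × Int := ([[10]], 3)

def Spec_get_subsequent_layer_py (init_hls : List (List Int)) (n_sub_layer : Int) (out : List (List Int)) : Prop := out = get_subsequent_layer_py_alt init_hls n_sub_layer
instance (init_hls : List (List Int)) (n_sub_layer : Int) (out : List (List Int)) : Decidable (Spec_get_subsequent_layer_py init_hls n_sub_layer out) := by unfold Spec_get_subsequent_layer_py; infer_instance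

-- ===== CLAIM (what is proved, stated in full; the proofs are below) =====
def Claim_equal_get_subsequent_layer_py : Prop := ∀ (init_hls : List (List Int)) (n_sub_layer : Int), Dom_get_subsequent_layer_py init_hls n_sub_layer → Pre_get_subsequent_layer_py init_hls n_sub_layer → Spec_get_subsequent_layer_py init_hls n_sub_layer (get_subsequent_layer_py init_hls n_sub_layer)

-- ===== LEMMAS AND PROOFS =====
lemma pvB_succ (init : List (List Int)) (k : Nat) :
    (List.range (k + 1)).foldl (fun acc _ => pvStepB acc) init
      = (List.range k).foldl (fun acc _ => pvStepB acc) (pvStepB init) := by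
  simp [List.range_succ_eq_map, List.foldl_map]

lemma pvMain (k : Nat) (init : List (List Int)) (h : init.getLast?.getD [] ≠ []) :
    get_subsequent_layer_py init (k : Int)
      = (List.range k).foldl (fun acc _ => pvStepB acc) init := by
  induction k generalizing init with
  | zero => simp [get_subsequent_layer_py]
  | succ m ih =>
    obtain ⟨last, hlast⟩ : ∃ l, init.getLast? = some l := by
      cases hl : init.getLast? with
      | none => simp [hl] at h
      | some l => exact ⟨l, rfl⟩
    have hlne : last ≠ [] := by simpa [hlast] using h
    obtain ⟨sz, hsz⟩ : ∃ s, last.getLast? = some s := by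
      cases hs : last.getLast? with
      | none => exact absurd (List.getLast?_eq_none_iff.mp hs) hlne
      | some s => exact ⟨s, rfl⟩
    have hget1 : PySem.List.pyGet? init (-1) = some last := by
      rw [PySem.List.pyGet?_neg_one]; exact hlast
    have hget2 : PySem.List.pyGet? last (-1) = some sz := by
      rw [PySem.List.pyGet?_neg_one]; exact hsz
    have hstep : pvStepB init = init ++ [last ++ [PySem.Int.truncdiv sz 2]] := by
      simp [pvStepB, hget1, hget2]
    have hA : get_subsequent_layer_py init ((m + 1 : Nat) : Int)
        = get_subsequent_layer_py (init ++ [last ++ [PySem.Int.truncdiv sz 2]]) (m : Int) := by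
      rw [get_subsequent_layer_py]
      have h0 : ¬ ((m + 1 : Nat) : Int) = 0 := by omega
      have h1 : ¬ ((m + 1 : Nat) : Int) < 0 := by omega
      simp only [h0, h1, if_false, hget1, hget2]
      norm_num
    rw [hA, pvB_succ, hstep]
    exact ih _ (by simp)

-- ===== VERDICT (by name: the statement is the Claim_ definition above) =====
theorem get_subsequent_layer_py_spec : Claim_equal_get_subsequent_layer_py := by
  intro init n _ hpre
  obtain ⟨hn, hcase⟩ := hpre
  unfold Spec_get_subsequent_layer_py get_subsequent_layer_py_alt
  rcases hcase with h0 | hne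
  · subst h0; rw [get_subsequent_layer_py]; simp
  · obtain ⟨k, rfl⟩ : ∃ k : Nat, n = (k : Int) := ⟨n.toNat, by omega⟩
    rw [pvMain k init hne]
    simp
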